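-- pv_equiv track=rewrite | github.com/correlllab/EROM | EROM.py | objs_choose_k
-- ===== SOURCE A (Python) =====
-- def objs_choose_k( objs, k : int, bgn = None, end = None ):
--     """ Length choose k """
--     ## Init ##
--     Nreadings = len( objs )
--     comboList = []
--     if bgn is None:
--         bgn = 0
--     if end is None:
--         end = Nreadings-(k-1)
--     ## Generate all reading combinations ##
--     if k == 1:
--         for i in range( bgn, end ):
--             comboList.append( [objs[i],] )
--     elif k > 1:
--         for i in range( bgn, end ):
--             lst_i = [objs[i],]
--             for add_j in objs_choose_k( objs, k-1, bgn+1, end+1 ):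
--                 lst_j = lst_i[:]
--                 lst_j.extend( add_j )
--                 comboList.append( lst_j )
--     return comboList
-- ===== SOURCE B (Python) =====
-- def objs_choose_k( objs, k : int, bgn = None, end = None ):
--     """ Length choose k (same shifted-range semantics), built bottom-up in one pass
--         instead of re-running the identical recursive call for every i. """
--     if bgn is None:
--         bgn = 0
--     if end is None:
--         end = len( objs ) - (k - 1)
--     if k < 1 or bgn >= end:
--         return []
--     res = [[]]
--     for j in reversed( range( k ) ):
--         res = [[objs[i]] + t for i in range( bgn + j, end + j ) for t in res]
--     return res
-- ===== Notes on version B (the rewrite author's own statement) =====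
-- stated objective: alternative
-- what changed: Replaces the recursion that re-runs the identical recursive call (bgn+1,end+1) for every i of the outer loop by a single bottom-up pass: one suffix-product list per level, extended level by level from j=k-1 down to 0.
import Mathlib
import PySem

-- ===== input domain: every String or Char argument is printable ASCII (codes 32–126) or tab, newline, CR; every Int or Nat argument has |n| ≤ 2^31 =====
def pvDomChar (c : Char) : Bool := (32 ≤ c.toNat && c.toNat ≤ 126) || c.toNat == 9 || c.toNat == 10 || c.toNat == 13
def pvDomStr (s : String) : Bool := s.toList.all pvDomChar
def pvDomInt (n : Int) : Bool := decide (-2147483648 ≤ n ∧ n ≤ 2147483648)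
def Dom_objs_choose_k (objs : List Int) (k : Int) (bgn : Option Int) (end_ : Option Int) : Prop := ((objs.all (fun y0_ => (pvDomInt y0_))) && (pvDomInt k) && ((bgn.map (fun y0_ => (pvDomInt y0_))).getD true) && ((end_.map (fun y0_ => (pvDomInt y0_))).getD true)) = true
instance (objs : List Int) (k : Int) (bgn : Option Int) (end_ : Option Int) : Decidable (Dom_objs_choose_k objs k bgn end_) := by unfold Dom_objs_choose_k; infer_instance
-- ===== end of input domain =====

-- B builds the same shifted-range product bottom-up in one pass instead of re-running the
-- loop-invariant recursive call for every i of the outer loop (alternative decomposition).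

-- ===== PORT A =====
def objs_choose_k (objs : List Int) (k : Int) (bgn : Option Int) (end_ : Option Int) : List (List Int) :=
  let Nreadings : Int := objs.length
  let b := bgn.getD 0
  let e := end_.getD (Nreadings - (k - 1))
  if _h1 : k = 1 then
    (PySem.List.pyRange b e 1).foldl
      (fun acc i => acc ++ [[(PySem.List.pyGet? objs i).getD 0]]) []
  else if _h2 : 1 < k then
    (PySem.List.pyRange b e 1).foldl
      (fun acc i =>
        let lst_i := [(PySem.List.pyGet? objs i).getD 0]
        (objs_choose_k objs (k - 1) (some (b + 1)) (some (e + 1))).foldl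
          (fun acc2 add_j => acc2 ++ [lst_i ++ add_j]) acc) []
  else []
termination_by k.toNat
decreasing_by omega

-- ===== PORT B =====
def objs_choose_k_alt (objs : List Int) (k : Int) (bgn : Option Int) (end_ : Option Int) : List (List Int) :=
  let b := bgn.getD 0
  let e := end_.getD ((objs.length : Int) - (k - 1))
  if k < 1 ∨ e ≤ b then []
  else
    ((PySem.List.pyRange 0 k 1).reverse).foldl
      (fun res j =>
        (PySem.List.pyRange (b + j) (e + j) 1).flatMap
          (fun i => res.map (fun t => (PySem.List.pyGet? objs i).getD 0 :: t)))
      [[]]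

-- ===== PRECONDITION & SPEC =====
-- Pre_ excludes exactly the inputs where Python's A raises IndexError: some accessed index
-- (the union of the shifted ranges is [b, e+k-1)) falls outside [-len(objs), len(objs)).
def Pre_objs_choose_k (objs : List Int) (k : Int) (bgn : Option Int) (end_ : Option Int) : Prop :=
  let b := bgn.getD 0
  let e := end_.getD ((objs.length : Int) - (k - 1))
  k < 1 ∨ e ≤ b ∨ (-(objs.length : Int) ≤ b ∧ e + (k - 1) ≤ (objs.length : Int))
instance (objs : List Int) (k : Int) (bgn : Option Int) (end_ : Option Int) : Decidable (Pre_objs_choose_k objs k bgn end_) := by unfold Pre_objs_choose_k; infer_instance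

def pvWitness_objs_choose_k : List Int × Int × Option Int × Option Int := ([1, 2, 3], 2, none, none)

def Spec_objs_choose_k (objs : List Int) (k : Int) (bgn : Option Int) (end_ : Option Int) (out : List (List Int)) : Prop := out = objs_choose_k_alt objs k bgn end_
instance (objs : List Int) (k : Int) (bgn : Option Int) (end_ : Option Int) (out : List (List Int)) : Decidable (Spec_objs_choose_k objs k bgn end_ out) := by unfold Spec_objs_choose_k; infer_instance

-- ===== CLAIM (what is proved, stated in full; the proofs are below) =====
def Claim_equal_objs_choose_k : Prop := ∀ (objs : List Int) (k : Int) (bgn : Option Int) (end_ : Option Int), Dom_objs_choose_k objs k bgn end_ → Pre_objs_choose_k objs k bgn end_ → Spec_objs_choose_k objs k bgn end_ (objs_choose_k objs k bgn end_)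

-- ===== LEMMAS AND PROOFS =====

-- The common mathematical core: the shifted-range product, one level at a time.
def pvP (objs : List Int) : Nat → Int → Int → List (List Int)
  | 0, _, _ => [[]]
  | n + 1, b, e =>
      (PySem.List.pyRange b e 1).flatMap
        (fun i => (pvP objs n (b + 1) (e + 1)).map
          (fun t => (PySem.List.pyGet? objs i).getD 0 :: t))

theorem objs_choose_k_eq_pvP (objs : List Int) (n : Nat) (bgn end_ : Option Int) :
    objs_choose_k objs ((n : Int) + 1) bgn end_ =
      pvP objs (n + 1) (bgn.getD 0) (end_.getD ((objs.length : Int) - (n : Int))) := by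
  induction n generalizing bgn end_ with
  | zero =>
      rw [objs_choose_k]
      simp [pvP, List.flatMap]
  | succ n ih =>
      rw [objs_choose_k]
      have hk1 : ¬ ((((n + 1 : Nat)) : Int) + 1 = 1) := by push_cast; omega
      have hk2 : (1 : Int) < ((n + 1 : Nat) : Int) + 1 := by push_cast; omega
      have hrec : (((n + 1 : Nat) : Int) + 1) - 1 = (n : Int) + 1 := by push_cast; ring
      simp only [dif_neg hk1, dif_pos hk2, hrec, ih]
      simp only [PySem.List.foldl_append_singleton_eq_map, PySem.List.foldl_append_eq_flatMap]
      have hn : ((n + 1 : Nat) : Int) = (n : Int) + 1 := by push_cast; ring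
      simp [pvP, hn, sub_add_eq_sub_sub]

theorem pvP_nil (objs : List Int) (n : Nat) (b e : Int) (h : e ≤ b) :
    pvP objs (n + 1) b e = [] := by
  have h0 : (e - b).toNat = 0 := by omega
  simp [pvP, PySem.List.pyRange_one, h0]

theorem pvFoldr (objs : List Int) (b e : Int) (n m : Nat) :
    (List.range n).foldr
      (fun (j : Nat) res =>
        (PySem.List.pyRange (b + (j : Int)) (e + (j : Int)) 1).flatMap
          (fun i => res.map (fun t => (PySem.List.pyGet? objs i).getD 0 :: t)))
      (pvP objs m (b + (n : Int)) (e + (n : Int))) = pvP objs (m + n) b e := by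
  induction n generalizing m with
  | zero => simp
  | succ n ih =>
      rw [List.range_succ, List.foldr_append]
      have hstep : (PySem.List.pyRange (b + (n : Int)) (e + (n : Int)) 1).flatMap
          (fun i => (pvP objs m (b + ((n + 1 : Nat) : Int)) (e + ((n + 1 : Nat) : Int))).map
            (fun t => (PySem.List.pyGet? objs i).getD 0 :: t)) =
          pvP objs (m + 1) (b + (n : Int)) (e + (n : Int)) := by
        have h1 : b + ((n + 1 : Nat) : Int) = (b + (n : Int)) + 1 := by push_cast; ring
        have h2 : e + ((n + 1 : Nat) : Int) = (e + (n : Int)) + 1 := by push_cast; ring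
        rw [h1, h2]; rfl
      simp only [List.foldr_cons, List.foldr_nil, hstep, ih]
      congr 1
      omega

theorem objs_choose_k_alt_eq_pvP (objs : List Int) (n : Nat) (bgn end_ : Option Int)
    (h : bgn.getD 0 < end_.getD ((objs.length : Int) - (n : Int))) :
    objs_choose_k_alt objs ((n : Int) + 1) bgn end_ =
      pvP objs (n + 1) (bgn.getD 0) (end_.getD ((objs.length : Int) - (n : Int))) := by
  set b := bgn.getD 0
  set e := end_.getD ((objs.length : Int) - (n : Int))
  have hguard : ¬ ((((n : Int) + 1) < 1) ∨ e ≤ b) := by omega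
  have hsub : (objs.length : Int) - ((n : Int) + 1 - 1) = (objs.length : Int) - (n : Int) := by ring
  unfold objs_choose_k_alt
  simp only [hsub]
  rw [if_neg hguard]
  have hrange : PySem.List.pyRange 0 ((n : Int) + 1) 1 =
      (List.range (n + 1)).map (fun j : Nat => (j : Int)) := by
    have hT : (((n : Int) + 1) - 0).toNat = n + 1 := by omega
    rw [PySem.List.pyRange_one, hT]
    simp only [zero_add]
  rw [hrange, ← List.map_reverse, List.foldl_map, List.foldl_reverse]
  have := pvFoldr objs b e (n + 1) 0
  simpa [pvP] using this

-- ===== VERDICT (by name: the statement is the Claim_ definition above) =====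
theorem objs_choose_k_spec : Claim_equal_objs_choose_k := by
  intro objs k bgn end_ _hdom hpre
  unfold Spec_objs_choose_k
  by_cases hk : k < 1
  · have h1 : ¬ (k = 1) := by omega
    have h2 : ¬ ((1 : Int) < k) := by omega
    rw [objs_choose_k, objs_choose_k_alt]
    simp [dif_neg h1, dif_neg h2, hk]
  · obtain ⟨n, rfl⟩ : ∃ n : Nat, k = (n : Int) + 1 := ⟨(k - 1).toNat, by omega⟩
    by_cases hbe : end_.getD ((objs.length : Int) - (n : Int)) ≤ bgn.getD 0
    · rw [objs_choose_k_eq_pvP, pvP_nil _ _ _ _ hbe, objs_choose_k_alt]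
      simp only [add_sub_cancel_right]
      rw [if_pos (Or.inr hbe)]
    · rw [objs_choose_k_eq_pvP, objs_choose_k_alt_eq_pvP]
      omega
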